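-- pv_equiv track=rewrite | github.com/Marat-nsu/2048 | main.py | monotonicity_score
-- ===== SOURCE A (Python) =====
-- def monotonicity_score(line):
--     score = 0
--     for i in range(len(line) - 1):
--         if line[i] != line[i + 1]:
--             score += 1
--         else:
--             score += 2
--     return score
-- ===== SOURCE B (Python) =====
-- def monotonicity_score(line):
--     # run-structure formula: score = (n-1) + (#equal adjacent pairs) = 2*n - 1 - (#runs)
--     n = len(line)
--     if n == 0:
--         return 0
--     groups = 0
--     i = 0
--     while i < n:
--         v = line[i]
--         while i < n and line[i] == v:
--             i += 1
--         groups += 1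
--     return 2 * n - 1 - groups
-- ===== Notes on version B (the rewrite author's own statement) =====
-- stated objective: alternative
-- what changed: B counts consecutive-equal runs by skipping over each run and returns the closed form 2*len(line)-1-num_runs (0 for empty), instead of A's per-pair accumulation of 1 or 2.
import Mathlib
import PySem

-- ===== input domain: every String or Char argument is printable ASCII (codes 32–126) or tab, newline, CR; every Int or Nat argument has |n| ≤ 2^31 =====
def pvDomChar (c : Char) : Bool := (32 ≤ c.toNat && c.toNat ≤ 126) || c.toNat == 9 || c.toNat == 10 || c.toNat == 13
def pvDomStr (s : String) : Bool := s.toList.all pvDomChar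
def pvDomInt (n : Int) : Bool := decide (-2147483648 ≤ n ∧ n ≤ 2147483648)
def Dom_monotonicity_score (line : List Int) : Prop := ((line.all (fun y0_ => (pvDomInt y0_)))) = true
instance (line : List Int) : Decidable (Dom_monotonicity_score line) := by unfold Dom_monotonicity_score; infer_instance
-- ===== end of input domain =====

-- B replaces A's per-adjacent-pair accumulation (1 if different, 2 if equal) by counting
-- consecutive-equal runs and returning the closed form 2*n - 1 - num_runs (0 for empty).


-- ===== PORT A =====
-- for i in range(len(line)-1): score += 1 if line[i] != line[i+1] else 2
-- indices i and i+1 are always in range here, so pyGetD with default 0 is exact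
def monotonicity_score (line : List Int) : Int :=
  (PySem.List.pyRange 0 ((line.length : Int) - 1) 1).foldl
    (fun score i =>
      if PySem.List.pyGetD line i 0 ≠ PySem.List.pyGetD line (i + 1) 0 then score + 1
      else score + 2) 0

-- ===== PORT B =====
-- outer while loop = recursion on the remaining suffix; inner while loop (skip the
-- current run) = dropWhile
def pvCountGroups : List Int → Int
  | [] => 0
  | x :: xs => 1 + pvCountGroups (xs.dropWhile (· == x))
termination_by l => l.length
decreasing_by
  simp only [List.length_cons]
  exact Nat.lt_succ_of_le (List.length_dropWhile_le _ _)

def monotonicity_score_alt (line : List Int) : Int :=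
  if line = [] then 0
  else 2 * (line.length : Int) - 1 - pvCountGroups line

-- ===== PRECONDITION & SPEC =====
def Spec_monotonicity_score (line : List Int) (out : Int) : Prop := out = monotonicity_score_alt line
instance (line : List Int) (out : Int) : Decidable (Spec_monotonicity_score line out) := by unfold Spec_monotonicity_score; infer_instance

-- ===== CLAIM (what is proved, stated in full; the proofs are below) =====
def Claim_equal_monotonicity_score : Prop := ∀ (line : List Int), Dom_monotonicity_score line → Spec_monotonicity_score line (monotonicity_score line)

-- ===== LEMMAS AND PROOFS =====

-- structural form of A's pairwise score, used only in the proofs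
def pvPairs : List Int → Int
  | [] => 0
  | [_] => 0
  | x :: y :: xs => (if x ≠ y then 1 else 2) + pvPairs (y :: xs)

lemma monotonicity_score_eq_pairs (line : List Int) :
    monotonicity_score line = pvPairs line := by
  induction line with
  | nil => decide
  | cons x xs ih =>
    cases xs with
    | nil =>
      unfold monotonicity_score pvPairs
      norm_num [PySem.List.pyRange_one_eq_nil]
    | cons y ys =>
      unfold monotonicity_score pvPairs
      have hlen : ((x :: y :: ys).length : Int) - 1 = ((y :: ys).length : Int) := by
        simp only [List.length_cons]; push_cast; ring
      rw [hlen, PySem.List.pyRange_one_cons (by exact_mod_cast Nat.succ_pos (y :: ys).length.pred)]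
      simp only [List.foldl_cons, zero_add]
      have hr : PySem.List.pyRange 1 ((y :: ys).length : Int) 1
          = (PySem.List.pyRange 0 (((y :: ys).length : Int) - 1) 1).map (· + 1) := by
        rw [PySem.List.pyRange_one, PySem.List.pyRange_one]
        simp [List.map_map, Function.comp_def, add_comm]
      rw [hr, List.foldl_map]
      have hcongr : ∀ (init : Int),
          (PySem.List.pyRange 0 (((y :: ys).length : Int) - 1) 1).foldl
            (fun score i =>
              if PySem.List.pyGetD (x :: y :: ys) (i + 1) 0
                  ≠ PySem.List.pyGetD (x :: y :: ys) (i + 1 + 1) 0 then score + 1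
              else score + 2) init
          = (PySem.List.pyRange 0 (((y :: ys).length : Int) - 1) 1).foldl
            (fun score i =>
              if PySem.List.pyGetD (y :: ys) i 0
                  ≠ PySem.List.pyGetD (y :: ys) (i + 1) 0 then score + 1
              else score + 2) init := by
        intro init
        apply PySem.List.foldl_congr_mem
        intro acc i hi
        have h01 : (0:Int) ≤ i := (PySem.List.mem_pyRange_one.mp hi).1
        have hcons : ∀ (j : Int), 0 ≤ j →
            PySem.List.pyGetD (x :: y :: ys) (j + 1) 0 = PySem.List.pyGetD (y :: ys) j 0 := by
          intro j hj
          obtain ⟨k, rfl⟩ := Int.eq_ofNat_of_zero_le hj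
          have : ((k:Int) + 1) = ((k+1 : Nat) : Int) := by push_cast; ring
          rw [this, PySem.List.pyGetD_natCast, PySem.List.pyGetD_natCast]
          simp
        rw [hcons i h01, hcons (i+1) (by omega)]
      have hstep :
          (if PySem.List.pyGetD (x :: y :: ys) (0:Int) 0
              ≠ PySem.List.pyGetD (x :: y :: ys) (1:Int) 0 then (1:Int)
           else (2:Int)) = (if x ≠ y then 1 else 2) := by
        norm_num [PySem.List.pyGetD_zero_cons]
        rw [show ((1:Int)) = ((1:Nat):Int) by norm_num, PySem.List.pyGetD_natCast]
        simp
      rw [hstep]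
      -- peel the initial value out of both foldls via foldl_add, then use ih
      have hshape : ∀ (zs : List Int) (init : Int),
          (PySem.List.pyRange 0 ((zs.length : Int) - 1) 1).foldl
            (fun score i =>
              if PySem.List.pyGetD zs i 0 ≠ PySem.List.pyGetD zs (i + 1) 0 then score + 1
              else score + 2) init
          = init + (PySem.List.pyRange 0 ((zs.length : Int) - 1) 1).foldl
            (fun score i =>
              if PySem.List.pyGetD zs i 0 ≠ PySem.List.pyGetD zs (i + 1) 0 then score + 1
              else score + 2) 0 := by
        intro zs init
        have hfun : (fun (score i : Int) =>
            if PySem.List.pyGetD zs i 0 ≠ PySem.List.pyGetD zs (i + 1) 0 then score + 1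
            else score + 2)
            = fun score i =>
              score + (if PySem.List.pyGetD zs i 0 ≠ PySem.List.pyGetD zs (i + 1) 0 then 1 else 2) := by
          funext score i; split_ifs <;> ring
        rw [hfun, PySem.List.foldl_add, PySem.List.foldl_add]
        ring
      rw [hcongr, hshape (y :: ys)]
      unfold monotonicity_score at ih
      rw [← ih]

-- pvPairs + pvCountGroups = 2*len - 1 on nonempty lists
lemma countGroups_cons_cons (x y : Int) (ys : List Int) :
    pvCountGroups (x :: y :: ys) = (if x = y then 0 else 1) + pvCountGroups (y :: ys) := by
  by_cases hxy : x = y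
  · subst hxy
    simp [pvCountGroups]
  · have hb : (y == x) = false := by simp [Ne.symm hxy]
    simp [pvCountGroups, hb, hxy]

lemma pairs_add_groups (line : List Int) (h : line ≠ []) :
    pvPairs line + pvCountGroups line = 2 * (line.length : Int) - 1 := by
  induction line with
  | nil => exact absurd rfl h
  | cons x xs ih =>
    cases xs with
    | nil => simp [pvPairs, pvCountGroups]
    | cons y ys =>
      have ih' := ih (by simp)
      have hp : pvPairs (x :: y :: ys) = (if x ≠ y then 1 else 2) + pvPairs (y :: ys) := rfl
      rw [hp, countGroups_cons_cons]
      split_ifs with h1 h2 <;> simp only [List.length_cons] at ih' ⊢ <;> push_cast at ih' ⊢ <;> omega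

-- ===== VERDICT (by name: the statement is the Claim_ definition above) =====
theorem monotonicity_score_spec : Claim_equal_monotonicity_score := by
  intro line _
  unfold Spec_monotonicity_score monotonicity_score_alt
  rw [monotonicity_score_eq_pairs]
  by_cases h : line = []
  · subst h; decide
  · rw [if_neg h]
    have := pairs_add_groups line h
    omega
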